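-- pv_equiv track=rewrite | github.com/derng/3-in-a-Row-Solver | parser.py | validateLine
-- ===== SOURCE A (Python) =====
-- def isDigit(c):
--  n = ord(c) - ord('0')
--  return n >= 0 and n <= 9
--
-- def validateLine(line):
--  hasDigit = 0
--
--  for c in line:
--   if c == '\r' or c == '\n' or c == ' ':
--    continue
--   elif not isDigit(c):
--    return 0
--   hasDigit = 1
--
--  return hasDigit
-- ===== SOURCE B (Python) =====
-- def validateLine(line):
--     chars = set(line)
--     allowed = set("0123456789 \r\n")
--     digits = set("0123456789")
--     return 1 if chars <= allowed and chars & digits else 0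
-- ===== Notes on version B (the rewrite author's own statement) =====
-- stated objective: idiomatic
-- what changed: Replaces the per-character scan with early return and a hasDigit flag by building the set of distinct characters once and deciding via a subset test against the allowed alphabet plus a nonempty intersection with the digit set.
import Mathlib
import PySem

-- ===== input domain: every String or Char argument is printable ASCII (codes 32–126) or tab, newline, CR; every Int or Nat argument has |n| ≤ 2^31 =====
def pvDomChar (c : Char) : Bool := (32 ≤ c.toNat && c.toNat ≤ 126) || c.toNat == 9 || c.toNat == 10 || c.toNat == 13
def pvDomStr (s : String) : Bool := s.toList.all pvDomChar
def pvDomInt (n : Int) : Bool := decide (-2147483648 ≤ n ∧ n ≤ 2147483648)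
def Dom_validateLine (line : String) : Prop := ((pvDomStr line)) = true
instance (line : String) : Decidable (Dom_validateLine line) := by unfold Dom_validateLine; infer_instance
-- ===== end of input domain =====

-- B replaces A's per-character early-return scan by one set-of-characters build plus subset/intersection tests (idiomatic).


-- ===== PORT A =====
-- isDigit(c): n = ord(c) - ord('0'); return n >= 0 and n <= 9
def isDigitA (c : Char) : Bool := decide (0 ≤ (c.toNat : Int) - 48) && decide ((c.toNat : Int) - 48 ≤ 9)

-- the for-loop of validateLine: carries hasDigit, early-returns 0 on a bad char
def vLoopA : List Char → Int → Int
  | [], hasDigit => hasDigit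
  | c :: rest, hasDigit =>
    if c = '\r' ∨ c = '\n' ∨ c = ' ' then vLoopA rest hasDigit
    else if ¬ isDigitA c then 0
    else vLoopA rest 1

def validateLine (line : String) : Int := vLoopA line.toList 0

-- ===== PORT B =====
-- allowed = set("0123456789 \r\n"); digits = set("0123456789")  (the string literals written out as char lists)
def allowedB : PySem.Set Char :=
  PySem.Set.ofList ['0','1','2','3','4','5','6','7','8','9',' ','\r','\n']
def digitsB : PySem.Set Char :=
  PySem.Set.ofList ['0','1','2','3','4','5','6','7','8','9']

def validateLine_alt (line : String) : Int :=
  let chars : PySem.Set Char := PySem.Set.ofList line.toList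
  if PySem.Set.issubset chars allowedB ∧ PySem.Set.inter chars digitsB ≠ [] then 1 else 0

-- ===== PRECONDITION & SPEC =====
def Spec_validateLine (line : String) (out : Int) : Prop := out = validateLine_alt line
instance (line : String) (out : Int) : Decidable (Spec_validateLine line out) := by unfold Spec_validateLine; infer_instance

-- ===== CLAIM (what is proved, stated in full; the proofs are below) =====
def Claim_equal_validateLine : Prop := ∀ (line : String), Dom_validateLine line → Spec_validateLine line (validateLine line)

-- ===== LEMMAS AND PROOFS =====

lemma char_eq_iff_toNat (c d : Char) : c = d ↔ c.toNat = d.toNat :=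
  ⟨fun h => h ▸ rfl, fun h => Char.ext (by exact_mod_cast UInt32.toNat_inj.mp (by exact_mod_cast h))⟩

-- a character is in B's allowed set iff A's loop does not reject it
lemma mem_allowed_iff (c : Char) :
    c ∈ allowedB ↔ ((c = '\r' ∨ c = '\n' ∨ c = ' ') ∨ isDigitA c = true) := by
  rw [allowedB, PySem.Set.mem_ofList]
  simp only [List.mem_cons, List.not_mem_nil, or_false, char_eq_iff_toNat, isDigitA,
    Bool.and_eq_true, decide_eq_true_eq,
    show ('0' : Char).toNat = 48 from rfl, show ('1' : Char).toNat = 49 from rfl,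
    show ('2' : Char).toNat = 50 from rfl, show ('3' : Char).toNat = 51 from rfl,
    show ('4' : Char).toNat = 52 from rfl, show ('5' : Char).toNat = 53 from rfl,
    show ('6' : Char).toNat = 54 from rfl, show ('7' : Char).toNat = 55 from rfl,
    show ('8' : Char).toNat = 56 from rfl, show ('9' : Char).toNat = 57 from rfl,
    show (' ' : Char).toNat = 32 from rfl, show ('\r' : Char).toNat = 13 from rfl,
    show ('\n' : Char).toNat = 10 from rfl]
  omega

-- a character is in B's digit set iff A's isDigit accepts it
lemma mem_digits_iff (c : Char) :
    c ∈ digitsB ↔ isDigitA c = true := by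
  rw [digitsB, PySem.Set.mem_ofList]
  simp only [List.mem_cons, List.not_mem_nil, or_false, char_eq_iff_toNat, isDigitA,
    Bool.and_eq_true, decide_eq_true_eq,
    show ('0' : Char).toNat = 48 from rfl, show ('1' : Char).toNat = 49 from rfl,
    show ('2' : Char).toNat = 50 from rfl, show ('3' : Char).toNat = 51 from rfl,
    show ('4' : Char).toNat = 52 from rfl, show ('5' : Char).toNat = 53 from rfl,
    show ('6' : Char).toNat = 54 from rfl, show ('7' : Char).toNat = 55 from rfl,
    show ('8' : Char).toNat = 56 from rfl, show ('9' : Char).toNat = 57 from rfl]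
  omega

def okA (c : Char) : Bool := decide (c = '\r' ∨ c = '\n' ∨ c = ' ') || isDigitA c

lemma okA_iff (c : Char) :
    okA c = true ↔ ((c = '\r' ∨ c = '\n' ∨ c = ' ') ∨ isDigitA c = true) := by
  simp [okA]

-- characterisation of A's loop
lemma vLoopA_char (l : List Char) (h : Int) :
    vLoopA l h = if l.all okA then (if l.any isDigitA then 1 else h) else 0 := by
  induction l generalizing h with
  | nil => simp [vLoopA]
  | cons c cs ih =>
    simp only [vLoopA, List.all_cons, List.any_cons, okA]
    by_cases hws : c = '\r' ∨ c = '\n' ∨ c = ' '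
    · rw [if_pos hws, ih]
      have hd : isDigitA c = false := by
        rcases hws with rfl | rfl | rfl <;> rfl
      simp [hws, hd]
    · rw [if_neg hws]
      by_cases hdg : isDigitA c = true
      · rw [if_neg (by simp [hdg]), ih]
        simp [hws, hdg]
      · rw [if_pos (by simp [hdg])]
        simp only [Bool.not_eq_true] at hdg
        simp [hdg, hws]

lemma inter_ne_nil_iff (s t : PySem.Set Char) :
    PySem.Set.inter s t ≠ [] ↔ ∃ x ∈ s, x ∈ t := by
  rw [← List.isEmpty_eq_false_iff, List.isEmpty_eq_false_iff_exists_mem]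
  constructor
  · rintro ⟨x, hx⟩
    exact ⟨x, (PySem.Set.mem_inter s t x).mp hx⟩
  · rintro ⟨x, hx, hx'⟩
    exact ⟨x, (PySem.Set.mem_inter s t x).mpr ⟨hx, hx'⟩⟩

-- ===== VERDICT (by name: the statement is the Claim_ definition above) =====
theorem validateLine_spec : Claim_equal_validateLine := by
  intro line _
  unfold Spec_validateLine validateLine validateLine_alt
  rw [vLoopA_char]
  by_cases hall : (line.toList.all okA) = true
  · rw [if_pos hall]
    have hsub : PySem.Set.issubset (PySem.Set.ofList line.toList) allowedB = true := by
      rw [PySem.Set.issubset_iff]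
      intro x hx
      rw [PySem.Set.mem_ofList] at hx
      exact (mem_allowed_iff x).mpr ((okA_iff x).mp (List.all_eq_true.mp hall x hx))
    by_cases hany : (line.toList.any isDigitA) = true
    · rw [if_pos hany]
      obtain ⟨x, hx, hxd⟩ := List.any_eq_true.mp hany
      have hint : PySem.Set.inter (PySem.Set.ofList line.toList) digitsB ≠ [] := by
        rw [inter_ne_nil_iff]
        exact ⟨x, (PySem.Set.mem_ofList _ x).mpr hx, (mem_digits_iff x).mpr hxd⟩
      rw [if_pos ⟨hsub, hint⟩]
    · rw [if_neg hany]
      have hint : ¬ PySem.Set.inter (PySem.Set.ofList line.toList) digitsB ≠ [] := by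
        simp only [ne_eq, not_not]
        by_contra hne
        obtain ⟨x, hx, hxd⟩ := (inter_ne_nil_iff _ _).mp hne
        rw [PySem.Set.mem_ofList] at hx
        exact hany (List.any_eq_true.mpr ⟨x, hx, (mem_digits_iff x).mp hxd⟩)
      rw [if_neg (fun hc => hint hc.2)]
  · rw [if_neg hall]
    have hnsub : ¬ PySem.Set.issubset (PySem.Set.ofList line.toList) allowedB = true := by
      intro hsub
      apply hall
      rw [List.all_eq_true]
      intro x hx
      exact (okA_iff x).mpr ((mem_allowed_iff x).mp
        ((PySem.Set.issubset_iff _ _).mp hsub x ((PySem.Set.mem_ofList _ x).mpr hx)))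
    rw [if_neg (fun hc => hnsub hc.1)]
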